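-- pv_equiv track=rewrite | github.com/sygogo/HCSGM-ACSA | src/utils/metrics.py | convert_pairs
-- ===== SOURCE A (Python) =====
-- def convert_pairs(aspects, polarities):
--     pair_list = []
--     for (a, p) in zip(aspects, polarities):
--         pairs = []
--         for (i, j) in zip(a, p):
--             # when meet eos , break
--             if i == 2:
--                 break
--             pairs.append((i, j))
--         pair_list.append(pairs)
--     return pair_list
-- ===== SOURCE B (Python) =====
-- def convert_pairs(aspects, polarities):
--     def pairs(a, p):
--         cutoff = a.index(2) if 2 in a else len(a)
--         return list(zip(a[:cutoff], p))
--     return [pairs(a, p) for a, p in zip(aspects, polarities)]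
-- ===== Notes on version B (the rewrite author's own statement) =====
-- stated objective: idiomatic
-- what changed: Replaces the element-by-element inner loop with break by locating the EOS sentinel once (a.index(2) or len(a)), slicing up to it and zipping with the polarities in one expression.
import Mathlib
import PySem

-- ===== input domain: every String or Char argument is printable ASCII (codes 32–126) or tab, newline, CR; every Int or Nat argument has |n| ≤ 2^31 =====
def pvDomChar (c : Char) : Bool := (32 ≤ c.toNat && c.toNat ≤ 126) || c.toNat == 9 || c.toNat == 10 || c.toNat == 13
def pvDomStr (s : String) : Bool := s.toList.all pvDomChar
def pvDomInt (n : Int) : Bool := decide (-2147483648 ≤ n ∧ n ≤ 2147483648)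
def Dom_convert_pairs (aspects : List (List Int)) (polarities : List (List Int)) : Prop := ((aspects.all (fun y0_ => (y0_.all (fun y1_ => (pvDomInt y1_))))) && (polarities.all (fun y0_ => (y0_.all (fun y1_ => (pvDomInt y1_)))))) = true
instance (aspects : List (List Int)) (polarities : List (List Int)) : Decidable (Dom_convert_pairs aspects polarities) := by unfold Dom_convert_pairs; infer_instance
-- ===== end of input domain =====

-- B replaces A's element-wise inner loop with break by locating the EOS sentinel once, then slice-and-zip (objective: more idiomatic; same cost).

-- ===== PORT A =====
-- inner loop: for (i, j) in zip(a, p): if i == 2: break; pairs.append((i, j))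
def pvPairsA : List (Int × Int) → List (Int × Int)
  | [] => []
  | (i, j) :: rest => if i == 2 then [] else (i, j) :: pvPairsA rest

def convert_pairs (aspects : List (List Int)) (polarities : List (List Int)) : List (List (Int × Int)) :=
  (aspects.zip polarities).map (fun ap => pvPairsA (ap.1.zip ap.2))

-- ===== PORT B =====
-- pairs(a, p): cutoff = a.index(2) if 2 in a else len(a); list(zip(a[:cutoff], p))
def pvPairsB (a p : List Int) : List (Int × Int) :=
  let cutoff : Nat := match PySem.List.index? a 2 with
    | some k => k
    | none => a.length
  (PySem.List.slice a none (some (cutoff : Int))).zip p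

def convert_pairs_alt (aspects : List (List Int)) (polarities : List (List Int)) : List (List (Int × Int)) :=
  (aspects.zip polarities).map (fun ap => pvPairsB ap.1 ap.2)

-- ===== PRECONDITION & SPEC =====
def Spec_convert_pairs (aspects : List (List Int)) (polarities : List (List Int)) (out : List (List (Int × Int))) : Prop := out = convert_pairs_alt aspects polarities
instance (aspects : List (List Int)) (polarities : List (List Int)) (out : List (List (Int × Int))) : Decidable (Spec_convert_pairs aspects polarities out) := by unfold Spec_convert_pairs; infer_instance

-- ===== CLAIM (what is proved, stated in full; the proofs are below) =====
def Claim_equal_convert_pairs : Prop := ∀ (aspects : List (List Int)) (polarities : List (List Int)), Dom_convert_pairs aspects polarities → Spec_convert_pairs aspects polarities (convert_pairs aspects polarities)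

-- ===== LEMMAS AND PROOFS =====
theorem pvPairsB_take (a p : List Int) :
    pvPairsB a p = (a.take (match PySem.List.index? a 2 with
      | some k => k | none => a.length)).zip p := by
  simp only [pvPairsB]
  rw [PySem.List.slice_to_natCast]

theorem pvPairs_eq (a : List Int) : ∀ p : List Int, pvPairsA (a.zip p) = pvPairsB a p := by
  induction a with
  | nil => intro p; rw [pvPairsB_take]; simp [pvPairsA]
  | cons i a' ih =>
    intro p
    cases p with
    | nil => rw [pvPairsB_take]; simp [pvPairsA]
    | cons j p' =>
      rw [pvPairsB_take]
      by_cases hi : i = 2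
      · subst hi
        rw [PySem.List.index?_cons_self]
        simp [pvPairsA]
      · rw [PySem.List.index?_cons_of_ne a' hi]
        have hih := ih p'
        rw [pvPairsB_take] at hih
        cases h2 : PySem.List.index? a' 2 with
        | none =>
          rw [h2] at hih
          simp [pvPairsA, hi, List.take_succ_cons, hih]
        | some k =>
          rw [h2] at hih
          simp [pvPairsA, hi, List.take_succ_cons, hih]

-- ===== VERDICT (by name: the statement is the Claim_ definition above) =====
theorem convert_pairs_spec : Claim_equal_convert_pairs := by
  intro aspects polarities _
  unfold Spec_convert_pairs convert_pairs convert_pairs_alt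
  exact List.map_congr_left (fun ap _ => pvPairs_eq ap.1 ap.2)
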